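-- pv_equiv track=rewrite | github.com/Kriss213/IRDP_nosleguma_darbs | vertical_decomposition.py | get_1D_cells
-- ===== SOURCE A (Python) =====
-- def get_side_edge(cell, right=True):
--     # Atrod punktus ar vienādu maksimālo x vērtību
--     cells_sorted_by_x = sorted(cell, key=lambda point: point[0])
--     if right:
--         # Pēdējiem diviem punktiem ir jābūt vienādām x koordinātēm
--         p1 = cells_sorted_by_x[-1]
--         p2 = cells_sorted_by_x[-2]
--         if p1[0] != p2[0]:
--             # nav taisnas labās malas
--             return None
--     else:
--         # Atrod kreiso malu
--         p1 = cells_sorted_by_x[0]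
--         p2 = cells_sorted_by_x[1]
--         if p1[0] != p2[0]:
--             # nav taisnas kreisās malas
--             return None
--     return [p1, p2]
--
-- def get_1D_cells(cells_2D): # jeb kopīgās malas starp 2D šūnām
--     # 2D saraksts ar 1D šūnām (daudzstūru vertikālajām malām)
--     cells_1D = []
--     for cell in cells_2D:
--         vertical_sides = [get_side_edge(cell, right=False), get_side_edge(cell, right=True)]
--         for side in vertical_sides:
--             if side == None:
--                 continue
--             cells_1D.append(side)
--     return cells_1D
-- ===== SOURCE B (Python) =====
-- def _vertical_edges(cell):
--     # straight vertical edges of one cell: leftmost and rightmost, when two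
--     # points share the extreme x
--     if len(cell) < 2:
--         return []
--     xs = [p[0] for p in cell]
--     mn = min(xs)
--     mx = max(xs)
--     lows = [p for p in cell if p[0] == mn]
--     highs = [p for p in cell if p[0] == mx]
--     edges = []
--     if len(lows) >= 2:
--         edges.append([lows[0], lows[1]])
--     if len(highs) >= 2:
--         edges.append([highs[-1], highs[-2]])
--     return edges
--
-- def get_1D_cells(cells_2D):
--     cells_1D = []
--     for cell in cells_2D:
--         cells_1D.extend(_vertical_edges(cell))
--     return cells_1D
-- ===== Notes on version B (the rewrite author's own statement) =====
-- stated objective: simpler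
-- what changed: Drops the two stable sorts per cell: one min/max pass plus two filters pick the first two points at the minimum x and the last two at the maximum x directly, instead of sorting the cell twice and reading border elements.
import Mathlib
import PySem

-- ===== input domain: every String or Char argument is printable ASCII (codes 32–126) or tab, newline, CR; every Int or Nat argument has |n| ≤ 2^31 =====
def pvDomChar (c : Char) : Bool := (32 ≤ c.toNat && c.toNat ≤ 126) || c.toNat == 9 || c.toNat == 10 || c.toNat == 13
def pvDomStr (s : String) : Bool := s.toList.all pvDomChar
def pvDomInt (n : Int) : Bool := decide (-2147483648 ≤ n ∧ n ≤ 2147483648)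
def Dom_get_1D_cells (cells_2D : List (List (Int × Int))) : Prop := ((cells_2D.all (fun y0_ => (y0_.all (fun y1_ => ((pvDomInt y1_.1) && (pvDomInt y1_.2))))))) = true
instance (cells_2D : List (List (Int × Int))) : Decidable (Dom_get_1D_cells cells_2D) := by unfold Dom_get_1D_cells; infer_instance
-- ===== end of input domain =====

-- B replaces the two stable sorts per cell by a single min/max computation plus
-- two filters (picking the first two points at the minimum x and the last two
-- at the maximum x), which is simpler and avoids sorting.

-- ===== PORT A =====
def get_side_edge (cell : List (Int × Int)) (right : Bool) : Option (List (Int × Int)) :=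
  let cells_sorted_by_x := PySem.List.sorted cell (fun point => point.1) false
  if right then
    match PySem.List.pyGet? cells_sorted_by_x (-1), PySem.List.pyGet? cells_sorted_by_x (-2) with
    | some p1, some p2 => if p1.1 ≠ p2.1 then none else some [p1, p2]
    | _, _ => none   -- IndexError (cell shorter than 2); excluded by Pre_
  else
    match PySem.List.pyGet? cells_sorted_by_x 0, PySem.List.pyGet? cells_sorted_by_x 1 with
    | some p1, some p2 => if p1.1 ≠ p2.1 then none else some [p1, p2]
    | _, _ => none   -- IndexError (cell shorter than 2); excluded by Pre_

def get_1D_cells (cells_2D : List (List (Int × Int))) : List (List (Int × Int)) :=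
  cells_2D.foldl (fun cells_1D cell =>
    let vertical_sides := [get_side_edge cell false, get_side_edge cell true]
    vertical_sides.foldl (fun acc side =>
      match side with
      | none => acc
      | some s => acc ++ [s]) cells_1D) []

-- ===== PORT B =====
def vertical_edges (cell : List (Int × Int)) : List (List (Int × Int)) :=
  if cell.length < 2 then []
  else
    let xs := cell.map (fun p => p.1)
    match PySem.List.min? xs (fun x => x), PySem.List.max? xs (fun x => x) with
    | some mn, some mx =>
      let lows := cell.filter (fun p => p.1 == mn)
      let highs := cell.filter (fun p => p.1 == mx)
      let e1 : List (List (Int × Int)) :=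
        match lows with
        | a :: b :: _ => [[a, b]]      -- lows[0], lows[1]
        | _ => []
      let e2 : List (List (Int × Int)) :=
        match highs.reverse with
        | a :: b :: _ => [[a, b]]      -- highs[-1], highs[-2]
        | _ => []
      e1 ++ e2
    | _, _ => []   -- unreachable: cell is nonempty here

def get_1D_cells_alt (cells_2D : List (List (Int × Int))) : List (List (Int × Int)) :=
  cells_2D.foldl (fun cells_1D cell => cells_1D ++ vertical_edges cell) []

-- ===== PRECONDITION & SPEC =====
-- Pre_ excludes exactly the inputs where A raises IndexError: a cell with fewer than 2 points.
def Pre_get_1D_cells (cells_2D : List (List (Int × Int))) : Prop :=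
  ∀ cell ∈ cells_2D, 2 ≤ cell.length
instance (cells_2D : List (List (Int × Int))) : Decidable (Pre_get_1D_cells cells_2D) := by
  unfold Pre_get_1D_cells; infer_instance

def pvWitness_get_1D_cells : (List (List (Int × Int))) := [[(0, 0), (0, 1), (2, 0)]]

def Spec_get_1D_cells (cells_2D : List (List (Int × Int))) (out : List (List (Int × Int))) : Prop := out = get_1D_cells_alt cells_2D
instance (cells_2D : List (List (Int × Int))) (out : List (List (Int × Int))) : Decidable (Spec_get_1D_cells cells_2D out) := by unfold Spec_get_1D_cells; infer_instance

-- ===== CLAIM (what is proved, stated in full; the proofs are below) =====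
def Claim_equal_get_1D_cells : Prop := ∀ (cells_2D : List (List (Int × Int))), Dom_get_1D_cells cells_2D → Pre_get_1D_cells cells_2D → Spec_get_1D_cells cells_2D (get_1D_cells cells_2D)
-- ===== LEMMAS AND PROOFS =====

theorem insertBy_append_left {α : Type} (before : α → α → Bool) (x : α) (F G : List α)
    (h : ∀ p ∈ F, before x p = false) :
    PySem.List.insertBy before x (F ++ G) = F ++ PySem.List.insertBy before x G := by
  induction F with
  | nil => simp
  | cons f F ih =>
    have hf := h f (by simp)
    simp [PySem.List.insertBy, hf, ih (fun p hp => h p (by simp [hp]))]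
theorem insertBy_append_right {α : Type} (before : α → α → Bool) (x : α) (G : List α)
    (f : α) (F' : List α) (h : ∀ p ∈ f :: F', before x p = true) :
    PySem.List.insertBy before x (G ++ f :: F') = PySem.List.insertBy before x G ++ f :: F' := by
  induction G with
  | nil => simp [PySem.List.insertBy, h f (by simp)]
  | cons g G ih =>
    by_cases hg : before x g
    · simp [PySem.List.insertBy, hg]
    · simp [PySem.List.insertBy, hg, ih]
theorem sorted_snoc (xs : List (Int × Int)) (x : Int × Int) :
    PySem.List.sorted (xs ++ [x]) (fun p => p.1) false
      = PySem.List.insertBy (fun a b => decide (a.1 < b.1)) x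
          (PySem.List.sorted xs (fun p => p.1) false) := by
  rw [PySem.List.sorted_eq_foldl_insertBy, PySem.List.sorted_eq_foldl_insertBy, List.foldl_append]
  rfl


theorem sorted_min_group (m : Int) (xs : List (Int × Int)) (h : ∀ p ∈ xs, m ≤ p.1) :
    PySem.List.sorted xs (fun p => p.1) false
      = xs.filter (fun p => p.1 == m)
        ++ PySem.List.sorted (xs.filter (fun p => !(p.1 == m))) (fun p => p.1) false := by
  induction xs using List.reverseRecOn with
  | nil => rfl
  | append_singleton xs x ih =>
    have hxs : ∀ p ∈ xs, m ≤ p.1 := fun p hp => h p (by simp [hp])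
    have hx : m ≤ x.1 := h x (by simp)
    rw [sorted_snoc, ih hxs]
    by_cases hxm : x.1 = m
    · have e1 : ((x.1 == m) : Bool) = true := by simpa using hxm
      have hF : ∀ p ∈ List.filter (fun p : Int × Int => p.1 == m) xs,
          (fun a b : Int × Int => decide (a.1 < b.1)) x p = false := by
        intro p hp
        have hpm := (List.mem_filter.mp hp).2
        simp only [beq_iff_eq] at hpm
        simp [hxm, hpm]
      rw [insertBy_append_left _ _ _ _ hF]
      have hins : PySem.List.insertBy (fun a b => decide (a.1 < b.1)) x
          (PySem.List.sorted (xs.filter (fun p => !(p.1 == m))) (fun p => p.1) false)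
          = x :: PySem.List.sorted (xs.filter (fun p => !(p.1 == m))) (fun p => p.1) false := by
        cases hG : PySem.List.sorted (xs.filter (fun p => !(p.1 == m))) (fun p => p.1) false with
        | nil => simp [PySem.List.insertBy]
        | cons g G' =>
          have hg : g ∈ xs.filter (fun p => !(p.1 == m)) := by
            rw [← PySem.List.mem_sorted (key := fun p : Int × Int => p.1) (rev := false), hG]
            simp
          have h1 : m ≤ g.1 := hxs g (List.mem_filter.mp hg).1
          have h2 : ¬ (g.1 = m) := by
            have := (List.mem_filter.mp hg).2; simpa using this
          have h3 : x.1 < g.1 := by omega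
          simp [PySem.List.insertBy, h3]
      rw [hins]
      have hfeq : List.filter (fun p : Int × Int => p.1 == m) (xs ++ [x])
          = List.filter (fun p : Int × Int => p.1 == m) xs ++ [x] := by
        simp [List.filter_append, e1]
      have hfne : List.filter (fun p : Int × Int => !(p.1 == m)) (xs ++ [x])
          = List.filter (fun p : Int × Int => !(p.1 == m)) xs := by
        simp [List.filter_append, e1]
      rw [hfeq, hfne]
      simp
    · have hlt : m < x.1 := lt_of_le_of_ne hx (fun e => hxm e.symm)
      have e1 : ((x.1 == m) : Bool) = false := by simpa using hxm
      have hF : ∀ p ∈ List.filter (fun p : Int × Int => p.1 == m) xs,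
          (fun a b : Int × Int => decide (a.1 < b.1)) x p = false := by
        intro p hp
        have hpm := (List.mem_filter.mp hp).2
        simp only [beq_iff_eq] at hpm
        simp [hpm]; omega
      rw [insertBy_append_left _ _ _ _ hF]
      have hfeq : List.filter (fun p : Int × Int => p.1 == m) (xs ++ [x])
          = List.filter (fun p : Int × Int => p.1 == m) xs := by
        simp [List.filter_append, e1]
      have hfne : List.filter (fun p : Int × Int => !(p.1 == m)) (xs ++ [x])
          = List.filter (fun p : Int × Int => !(p.1 == m)) xs ++ [x] := by
        simp [List.filter_append, e1]
      rw [hfeq, hfne, sorted_snoc]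

theorem sorted_max_group (m : Int) (xs : List (Int × Int)) (h : ∀ p ∈ xs, p.1 ≤ m) :
    PySem.List.sorted xs (fun p => p.1) false
      = PySem.List.sorted (xs.filter (fun p => !(p.1 == m))) (fun p => p.1) false
        ++ xs.filter (fun p => p.1 == m) := by
  induction xs using List.reverseRecOn with
  | nil => rfl
  | append_singleton xs x ih =>
    have hxs : ∀ p ∈ xs, p.1 ≤ m := fun p hp => h p (by simp [hp])
    have hx : x.1 ≤ m := h x (by simp)
    rw [sorted_snoc, ih hxs]
    by_cases hxm : x.1 = m
    · have e1 : ((x.1 == m) : Bool) = true := by simpa using hxm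
      have hall : ∀ p ∈ (PySem.List.sorted (xs.filter (fun p => !(p.1 == m))) (fun p => p.1) false
            ++ List.filter (fun p : Int × Int => p.1 == m) xs),
          (fun a b : Int × Int => decide (a.1 < b.1)) x p = false := by
        intro p hp
        rcases List.mem_append.mp hp with hp | hp
        · have hp' := (PySem.List.mem_sorted _ _ _ _).mp hp
          have := hxs p (List.mem_filter.mp hp').1
          simp; omega
        · have hpm := (List.mem_filter.mp hp).2
          simp only [beq_iff_eq] at hpm
          simp [hpm, hxm]
      rw [PySem.List.insertBy_of_forall_not_before _ _ _ hall]
      have hfeq : List.filter (fun p : Int × Int => p.1 == m) (xs ++ [x])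
          = List.filter (fun p : Int × Int => p.1 == m) xs ++ [x] := by
        simp [List.filter_append, e1]
      have hfne : List.filter (fun p : Int × Int => !(p.1 == m)) (xs ++ [x])
          = List.filter (fun p : Int × Int => !(p.1 == m)) xs := by
        simp [List.filter_append, e1]
      rw [hfeq, hfne]
      simp
    · have hlt : x.1 < m := lt_of_le_of_ne hx hxm
      have e1 : ((x.1 == m) : Bool) = false := by simpa using hxm
      have hfeq : List.filter (fun p : Int × Int => p.1 == m) (xs ++ [x])
          = List.filter (fun p : Int × Int => p.1 == m) xs := by
        simp [List.filter_append, e1]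
      have hfne : List.filter (fun p : Int × Int => !(p.1 == m)) (xs ++ [x])
          = List.filter (fun p : Int × Int => !(p.1 == m)) xs ++ [x] := by
        simp [List.filter_append, e1]
      rw [hfeq, hfne, sorted_snoc]
      cases hF : List.filter (fun p : Int × Int => p.1 == m) xs with
      | nil => simp
      | cons f F' =>
        have hall : ∀ p ∈ f :: F', (fun a b : Int × Int => decide (a.1 < b.1)) x p = true := by
          intro p hp
          have hpm := (List.mem_filter.mp (hF ▸ hp)).2
          simp only [beq_iff_eq] at hpm
          simp [hpm, hlt]
        rw [insertBy_append_right _ _ _ _ _ hall]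

theorem pyGet?_one_cons_cons {α : Type} (x y : α) (t : List α) :
    PySem.List.pyGet? (x :: y :: t) 1 = some y := by
  have h := PySem.List.pyGet?_cons_succ x (y :: t) 0
  simpa using h

theorem pyGet_last_two {α : Type} (s : List α) (a b : α) (t : List α) (h : s.reverse = a :: b :: t) :
    PySem.List.pyGet? s (-1) = some a ∧ PySem.List.pyGet? s (-2) = some b := by
  have hlen : s.length = t.length + 2 := by
    have := congrArg List.length h
    simpa using this
  constructor
  · rw [PySem.List.pyGet?_neg_one, List.getLast?_eq_head?_reverse, h]; rfl
  · rw [PySem.List.pyGet?_neg_ofNat s 2 (by omega) (by omega)]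
    have h2 : s.reverse[1]? = s[s.length - 1 - 1]? := List.getElem?_reverse (by omega)
    rw [h] at h2
    have h3 : s.length - 1 - 1 = s.length - 2 := by omega
    rw [h3] at h2
    simpa using h2.symm


theorem side_edge_left (cell : List (Int × Int)) (mn : Int) (hlen : 2 ≤ cell.length)
    (hmin : PySem.List.min? (cell.map (fun p => p.1)) (fun x => x) = some mn) :
    get_side_edge cell false
      = (match cell.filter (fun p => p.1 == mn) with
         | a :: b :: _ => some [a, b]
         | _ => none) := by
  have hle : ∀ p ∈ cell, mn ≤ p.1 := by
    intro p hp
    exact PySem.List.min?_isMin hmin p.1 (List.mem_map.mpr ⟨p, hp, rfl⟩)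
  obtain ⟨q, hq, hq1⟩ := List.mem_map.mp (PySem.List.min?_mem hmin)
  have hgrp := sorted_min_group mn cell hle
  have hslen : (PySem.List.sorted cell (fun p : Int × Int => p.1) false).length = cell.length :=
    PySem.List.length_sorted _ _ _
  cases hF : cell.filter (fun p : Int × Int => p.1 == mn) with
  | nil =>
    exfalso
    have : q ∈ cell.filter (fun p : Int × Int => p.1 == mn) :=
      List.mem_filter.mpr ⟨hq, by simp [hq1]⟩
    rw [hF] at this; simp at this
  | cons a F1 =>
    have ha : a.1 = mn := by
      have : a ∈ cell.filter (fun p : Int × Int => p.1 == mn) := by rw [hF]; simp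
      have := (List.mem_filter.mp this).2; simpa using this
    cases F1 with
    | nil =>
      rw [hF] at hgrp
      cases hG : PySem.List.sorted (cell.filter (fun p => !(p.1 == mn))) (fun p : Int × Int => p.1) false with
      | nil => rw [hG] at hgrp; rw [hgrp] at hslen; simp at hslen; omega
      | cons g G' =>
        have hg : ¬ (g.1 = mn) := by
          have : g ∈ cell.filter (fun p : Int × Int => !(p.1 == mn)) := by
            rw [← PySem.List.mem_sorted (rev := false) (key := fun p : Int × Int => p.1), hG]; simp
          have := (List.mem_filter.mp this).2; simpa using this
        rw [hG] at hgrp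
        simp only [get_side_edge, if_neg (by simp : ¬ (false = true)), hgrp]
        simp only [List.cons_append, List.nil_append, PySem.List.pyGet?_zero_cons,
          pyGet?_one_cons_cons]
        simp [ha]
        omega
    | cons b F2 =>
      have hb : b.1 = mn := by
        have : b ∈ cell.filter (fun p : Int × Int => p.1 == mn) := by rw [hF]; simp
        have := (List.mem_filter.mp this).2; simpa using this
      rw [hF] at hgrp
      simp only [get_side_edge, if_neg (by simp : ¬ (false = true)), hgrp]
      simp only [List.cons_append, PySem.List.pyGet?_zero_cons, pyGet?_one_cons_cons]
      simp [ha, hb]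

theorem side_edge_right (cell : List (Int × Int)) (mx : Int) (hlen : 2 ≤ cell.length)
    (hmax : PySem.List.max? (cell.map (fun p => p.1)) (fun x => x) = some mx) :
    get_side_edge cell true
      = (match (cell.filter (fun p => p.1 == mx)).reverse with
         | a :: b :: _ => some [a, b]
         | _ => none) := by
  have hle : ∀ p ∈ cell, p.1 ≤ mx := by
    intro p hp
    exact PySem.List.max?_isMax hmax p.1 (List.mem_map.mpr ⟨p, hp, rfl⟩)
  obtain ⟨q, hq, hq1⟩ := List.mem_map.mp (PySem.List.max?_mem hmax)
  have hgrp := sorted_max_group mx cell hle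
  have hslen : (PySem.List.sorted cell (fun p : Int × Int => p.1) false).length = cell.length :=
    PySem.List.length_sorted _ _ _
  cases hFr : (cell.filter (fun p : Int × Int => p.1 == mx)).reverse with
  | nil =>
    exfalso
    have hqF : q ∈ cell.filter (fun p : Int × Int => p.1 == mx) :=
      List.mem_filter.mpr ⟨hq, by simp [hq1]⟩
    rw [List.reverse_eq_nil_iff] at hFr
    rw [hFr] at hqF; simp at hqF
  | cons a T =>
    have ha : a.1 = mx := by
      have : a ∈ cell.filter (fun p : Int × Int => p.1 == mx) := by
        rw [← List.mem_reverse, hFr]; simp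
      have := (List.mem_filter.mp this).2; simpa using this
    cases T with
    | nil =>
      have hF : cell.filter (fun p : Int × Int => p.1 == mx) = [a] := by
        have := congrArg List.reverse hFr; simpa using this
      rw [hF] at hgrp
      cases hG : (PySem.List.sorted (cell.filter (fun p => !(p.1 == mx))) (fun p : Int × Int => p.1) false).reverse with
      | nil =>
        exfalso
        rw [List.reverse_eq_nil_iff] at hG
        rw [hG] at hgrp; rw [hgrp] at hslen; simp at hslen; omega
      | cons g R =>
        have hg : ¬ (g.1 = mx) := by
          have hgmem : g ∈ PySem.List.sorted (cell.filter (fun p => !(p.1 == mx))) (fun p : Int × Int => p.1) false := by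
            rw [← List.mem_reverse, hG]; simp
          have : g ∈ cell.filter (fun p : Int × Int => !(p.1 == mx)) :=
            (PySem.List.mem_sorted _ _ _ _).mp hgmem
          have := (List.mem_filter.mp this).2; simpa using this
        have hrev : (PySem.List.sorted cell (fun p : Int × Int => p.1) false).reverse
            = a :: g :: R := by
          rw [hgrp]; simp [hG]
        obtain ⟨h1, h2⟩ := pyGet_last_two _ _ _ _ hrev
        simp only [get_side_edge, h1, h2]
        simp [ha]
        omega
    | cons b T2 =>
      have hb : b.1 = mx := by
        have : b ∈ cell.filter (fun p : Int × Int => p.1 == mx) := by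
          rw [← List.mem_reverse, hFr]; simp
        have := (List.mem_filter.mp this).2; simpa using this
      have hrev : (PySem.List.sorted cell (fun p : Int × Int => p.1) false).reverse
          = a :: b :: (T2 ++ (PySem.List.sorted (cell.filter (fun p => !(p.1 == mx))) (fun p : Int × Int => p.1) false).reverse) := by
        rw [hgrp]; simp [hFr]
      obtain ⟨h1, h2⟩ := pyGet_last_two _ _ _ _ hrev
      simp only [get_side_edge, h1, h2]
      simp [ha, hb]

theorem step_cell (acc : List (List (Int × Int))) (cell : List (Int × Int))
    (hlen : 2 ≤ cell.length) :
    ([get_side_edge cell false, get_side_edge cell true].foldl (fun acc side =>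
      match side with
      | none => acc
      | some s => acc ++ [s]) acc) = acc ++ vertical_edges cell := by
  have hne : cell.map (fun p => p.1) ≠ [] := by
    cases cell with
    | nil => simp at hlen
    | cons c t => simp
  cases hmn : PySem.List.min? (cell.map (fun p => p.1)) (fun x => x) with
  | none => exact absurd ((PySem.List.min?_eq_none_iff _ _).mp hmn) hne
  | some mn =>
    cases hmx : PySem.List.max? (cell.map (fun p => p.1)) (fun x => x) with
    | none => exact absurd ((PySem.List.max?_eq_none_iff _ _).mp hmx) hne
    | some mx =>
      rw [show [get_side_edge cell false, get_side_edge cell true].foldl (fun acc side =>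
          match side with
          | none => acc
          | some s => acc ++ [s]) acc
        = (match get_side_edge cell true with
           | none => (match get_side_edge cell false with | none => acc | some s => acc ++ [s])
           | some s => (match get_side_edge cell false with | none => acc | some s => acc ++ [s]) ++ [s]) from by
        cases get_side_edge cell false <;> cases get_side_edge cell true <;> rfl]
      rw [side_edge_left cell mn hlen hmn, side_edge_right cell mx hlen hmx]
      simp only [vertical_edges, if_neg (by omega : ¬ cell.length < 2), hmn, hmx]
      cases hL : cell.filter (fun p : Int × Int => p.1 == mn) with
      | nil =>
        cases hH : (cell.filter (fun p : Int × Int => p.1 == mx)).reverse with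
        | nil => simp
        | cons a T => cases T <;> simp
      | cons a L1 =>
        cases L1 with
        | nil =>
          cases hH : (cell.filter (fun p : Int × Int => p.1 == mx)).reverse with
          | nil => simp
          | cons c T => cases T <;> simp
        | cons b L2 =>
          cases hH : (cell.filter (fun p : Int × Int => p.1 == mx)).reverse with
          | nil => simp
          | cons c T => cases T <;> simp

theorem fold_eq (cells : List (List (Int × Int))) (acc : List (List (Int × Int)))
    (h : ∀ cell ∈ cells, 2 ≤ cell.length) :
    cells.foldl (fun cells_1D cell =>
      let vertical_sides := [get_side_edge cell false, get_side_edge cell true]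
      vertical_sides.foldl (fun acc side =>
        match side with
        | none => acc
        | some s => acc ++ [s]) cells_1D) acc
    = cells.foldl (fun cells_1D cell => cells_1D ++ vertical_edges cell) acc := by
  induction cells generalizing acc with
  | nil => rfl
  | cons c cs ih =>
    have h1 := step_cell acc c (h c (by simp))
    calc List.foldl (fun (cells_1D : List (List (Int × Int))) (cell : List (Int × Int)) =>
        let vertical_sides := [get_side_edge cell false, get_side_edge cell true]
        vertical_sides.foldl (fun acc side =>
          match side with
          | none => acc
          | some s => acc ++ [s]) cells_1D) acc (c :: cs)
        = List.foldl (fun (cells_1D : List (List (Int × Int))) (cell : List (Int × Int)) =>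
        let vertical_sides := [get_side_edge cell false, get_side_edge cell true]
        vertical_sides.foldl (fun acc side =>
          match side with
          | none => acc
          | some s => acc ++ [s]) cells_1D) (acc ++ vertical_edges c) cs := by rw [← h1]; rfl
      _ = List.foldl (fun (cells_1D : List (List (Int × Int))) (cell : List (Int × Int)) => cells_1D ++ vertical_edges cell) (acc ++ vertical_edges c) cs :=
          ih _ (fun cell hc => h cell (by simp [hc]))
      _ = List.foldl (fun (cells_1D : List (List (Int × Int))) (cell : List (Int × Int)) => cells_1D ++ vertical_edges cell) acc (c :: cs) := rfl


-- ===== VERDICT (by name: the statement is the Claim_ definition above) =====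
theorem get_1D_cells_spec : Claim_equal_get_1D_cells := by
  intro cells_2D _ hpre
  unfold Spec_get_1D_cells
  simp only [get_1D_cells, get_1D_cells_alt]
  exact fold_eq cells_2D [] hpre
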